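-- pv_equiv track=rewrite | github.com/ryanchandrahardison-png/lifeware | core/item_detail_form.py | _status_index
-- ===== SOURCE A (Python) =====
-- def _status_index(status: str, options: list[str]) -> int:
--     if status in options:
--         return options.index(status)
--     lowered = status.lower()
--     for i, option in enumerate(options):
--         if option.lower() == lowered:
--             return i
--     return 0
-- ===== SOURCE B (Python) =====
-- def _status_index(status: str, options: list[str]) -> int:
--     lowered = status.lower()
--     exact_idx = None
--     ci_idx = None
--     for i, option in enumerate(options):
--         if exact_idx is None and option == status:
--             exact_idx = i
--         if ci_idx is None and option.lower() == lowered: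
--             ci_idx = i
--     if exact_idx is not None:
--         return exact_idx
--     if ci_idx is not None:
--         return ci_idx
--     return 0
-- ===== Notes on version B (the rewrite author's own statement) =====
-- stated objective: alternative
-- what changed: Replaces A's two-pass exact-then-case-insensitive search (membership test + .index, then a fallback loop) with a single enumerate pass that records the first exact and first case-insensitive match indices and resolves the priority after the loop.
import Mathlib
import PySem

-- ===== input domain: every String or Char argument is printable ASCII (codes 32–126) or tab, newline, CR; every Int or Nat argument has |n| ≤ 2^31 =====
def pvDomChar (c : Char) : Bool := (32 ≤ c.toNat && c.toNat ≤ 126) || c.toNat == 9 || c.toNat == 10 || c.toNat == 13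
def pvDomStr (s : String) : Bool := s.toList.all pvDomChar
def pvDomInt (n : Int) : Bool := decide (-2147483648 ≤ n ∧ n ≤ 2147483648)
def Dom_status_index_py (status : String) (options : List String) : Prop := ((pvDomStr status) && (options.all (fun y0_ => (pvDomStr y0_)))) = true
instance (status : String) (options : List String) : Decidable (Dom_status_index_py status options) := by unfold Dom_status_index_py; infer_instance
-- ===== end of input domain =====

-- B replaces A's two-pass exact-then-case-insensitive search with one enumerate pass
-- collecting both first-match candidates and resolving priority after the loop (alternative decomposition).

-- ===== PORT A =====
-- the fallback loop: for i, option in enumerate(options): if option.lower() == lowered: return i;  return 0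
def aFallback (lowered : String) : List (Int × String) → Int
  | [] => 0
  | (i, o) :: rest => if PySem.Str.lower o = lowered then i else aFallback lowered rest

def status_index_py (status : String) (options : List String) : Int :=
  if status ∈ options then
    ((PySem.List.index? options status).getD 0 : Nat)
  else
    aFallback (PySem.Str.lower status) (PySem.List.enumerate options)

-- ===== PORT B =====
-- one loop body: update exact_idx / ci_idx only when still None
def bStep (status lowered : String) (st : Option Int × Option Int) (p : Int × String) :
    Option Int × Option Int :=
  ((if st.1 = none ∧ p.2 = status then some p.1 else st.1),
   (if st.2 = none ∧ PySem.Str.lower p.2 = lowered then some p.1 else st.2))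

def status_index_py_alt (status : String) (options : List String) : Int :=
  let lowered := PySem.Str.lower status
  let r := (PySem.List.enumerate options).foldl (bStep status lowered) (none, none)
  match r.1 with
  | some i => i
  | none =>
    match r.2 with
    | some i => i
    | none => 0

-- ===== PRECONDITION & SPEC =====
def Spec_status_index_py (status : String) (options : List String) (out : Int) : Prop := out = status_index_py_alt status options
instance (status : String) (options : List String) (out : Int) : Decidable (Spec_status_index_py status options out) := by unfold Spec_status_index_py; infer_instance

-- ===== CLAIM (what is proved, stated in full; the proofs are below) =====
def Claim_equal_status_index_py : Prop := ∀ (status : String) (options : List String), Dom_status_index_py status options → Spec_status_index_py status options (status_index_py status options)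

-- ===== LEMMAS AND PROOFS =====

-- first index with an exact match, over an enumerated list
def firstExact (status : String) : List (Int × String) → Option Int
  | [] => none
  | (i, o) :: rest => if o = status then some i else firstExact status rest

-- first index with a case-insensitive match, over an enumerated list
def firstCI (lowered : String) : List (Int × String) → Option Int
  | [] => none
  | (i, o) :: rest => if PySem.Str.lower o = lowered then some i else firstCI lowered rest

theorem foldl_bStep_char (status lowered : String) (l : List (Int × String)) :
    ∀ e c, l.foldl (bStep status lowered) (e, c) =
      (e.orElse (fun _ => firstExact status l), c.orElse (fun _ => firstCI lowered l)) := by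
  induction l with
  | nil => intro e c; cases e <;> cases c <;> simp [firstExact, firstCI, Option.orElse]
  | cons p rest ih =>
    intro e c
    obtain ⟨i, o⟩ := p
    simp only [List.foldl_cons, bStep, ih]
    cases e <;> cases c <;>
      simp [firstExact, firstCI, Option.orElse] <;> split_ifs <;> simp_all

theorem aFallback_eq_firstCI (lowered : String) (l : List (Int × String)) :
    aFallback lowered l = (firstCI lowered l).getD 0 := by
  induction l with
  | nil => simp [aFallback, firstCI]
  | cons p rest ih =>
    obtain ⟨i, o⟩ := p
    simp only [aFallback, firstCI]
    split_ifs <;> simp [ih]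

theorem firstExact_of_not_mem (status : String) (options : List String) (s : Int)
    (h : status ∉ options) : firstExact status (PySem.List.enumerate options s) = none := by
  induction options generalizing s with
  | nil => simp [PySem.List.enumerate_nil, firstExact]
  | cons o rest ih =>
    simp only [List.mem_cons, not_or] at h
    rw [PySem.List.enumerate_cons]
    simp only [firstExact]
    rw [if_neg (by exact fun hh => h.1 hh.symm)]
    exact ih _ h.2

theorem firstExact_of_mem (status : String) (options : List String) (s : Int)
    (h : status ∈ options) :
    ∃ k : Nat, PySem.List.index? options status = some k ∧
      firstExact status (PySem.List.enumerate options s) = some (s + k) := by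
  induction options generalizing s with
  | nil => simp at h
  | cons o rest ih =>
    rw [PySem.List.enumerate_cons]
    simp only [firstExact]
    by_cases ho : o = status
    · subst ho
      exact ⟨0, by rw [PySem.List.index?_cons_self], by simp⟩
    · have hmem : status ∈ rest := by
        rcases List.mem_cons.mp h with h1 | h2
        · exact absurd h1.symm ho
        · exact h2
      obtain ⟨k, hk, hfe⟩ := ih (s + 1) hmem
      refine ⟨k + 1, ?_, ?_⟩
      · rw [PySem.List.index?_cons_of_ne _ ho, hk]; rfl
      · rw [if_neg ho, hfe]; congr 1; push_cast; ring

-- ===== VERDICT (by name: the statement is the Claim_ definition above) =====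
theorem status_index_py_spec : Claim_equal_status_index_py := by
  intro status options _
  unfold Spec_status_index_py status_index_py status_index_py_alt
  simp only [foldl_bStep_char]
  simp only [Option.orElse]
  by_cases h : status ∈ options
  · rw [if_pos h]
    obtain ⟨k, hk, hfe⟩ := firstExact_of_mem status options 0 h
    rw [hk, hfe]
    simp
  · rw [if_neg h, firstExact_of_not_mem status options 0 h,
      aFallback_eq_firstCI]
    cases firstCI (PySem.Str.lower status) (PySem.List.enumerate options 0) <;> rfl
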